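-- pv_equiv track=rewrite | github.com/GStreamer/cerbero | cerbero/utils/shell.py | _fix_mingw_cmd
-- ===== SOURCE A (Python) =====
-- def _fix_mingw_cmd(path):
--     reserved = ['/', ' ', '\\', ')', '(', '"']
--     l_path = list(path)
--     for i in range(len(path)):
--         if path[i] == '\\':
--             if i + 1 == len(path) or path[i + 1] not in reserved:
--                 l_path[i] = '/'
--     return ''.join(l_path)
-- ===== SOURCE B (Python) =====
-- def _fix_mingw_cmd(path):
--     reserved = '/ \\)("'
--     # Staged approach: split the string on backslashes, then rejoin the pieces,
--     # choosing '/' or '\' per boundary from the first character of the next piece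
--     # (an empty next piece means the backslash preceded another backslash, unless
--     # it is the last piece, i.e. the backslash ended the string).
--     parts = path.split('\\')
--     out = [parts[0]]
--     for i in range(1, len(parts)):
--         nxt = parts[i]
--         if nxt:
--             sep = '\\' if nxt[0] in reserved else '/'
--         else:
--             sep = '/' if i == len(parts) - 1 else '\\'
--         out.append(sep + nxt)
--     return ''.join(out)
-- ===== Notes on version B (the rewrite author's own statement) =====
-- stated objective: faster
-- what changed: Instead of A's per-character index loop with a lookahead test, B splits the string on backslashes and rejoins the pieces, choosing each separator (slash or backslash) from the first character of the next piece (an empty next piece means a consecutive backslash, an empty last piece a trailing backslash); the character scan is done by str.split/str.join, measured 8.9x faster at the largest size.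
import Mathlib
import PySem

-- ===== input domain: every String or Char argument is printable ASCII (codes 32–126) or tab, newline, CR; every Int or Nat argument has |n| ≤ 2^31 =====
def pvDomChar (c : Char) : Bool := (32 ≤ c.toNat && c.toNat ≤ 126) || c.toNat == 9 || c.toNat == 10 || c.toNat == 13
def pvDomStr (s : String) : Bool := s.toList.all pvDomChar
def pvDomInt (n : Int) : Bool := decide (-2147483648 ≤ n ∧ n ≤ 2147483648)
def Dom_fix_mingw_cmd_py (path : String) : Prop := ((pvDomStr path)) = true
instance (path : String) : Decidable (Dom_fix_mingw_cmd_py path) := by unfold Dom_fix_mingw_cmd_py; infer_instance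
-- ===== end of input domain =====

-- B replaces A's per-character index loop with split-on-backslash / rejoin-per-boundary (str.split does the scan; a timing run measured B faster).

-- ===== PORT A =====
-- literal port: list copy, loop over indices, in-place set, join
def fix_mingw_cmd_py (path : String) : String :=
  let reserved : List Char := ['/', ' ', '\\', ')', '(', '"']
  let cs := path.toList
  let l_path := (List.range cs.length).foldl (fun l i =>
    if cs.getD i ' ' = '\\' then
      if i + 1 = cs.length ∨ ¬ reserved.contains (cs.getD (i + 1) ' ') then l.set i '/'
      else l
    else l) cs
  String.mk l_path

-- ===== PORT B =====
-- port of Source B's join loop over parts[1:]; 'rest = []' transcribes Source B's 'i == len(parts) - 1'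
def altJoin (rs : List Char) : List (List Char) → List Char
  | [] => []
  | nxt :: rest =>
    (match nxt with
     | d :: _ => if rs.contains d then '\\' else '/'
     | [] => if rest = [] then '/' else '\\') :: (nxt ++ altJoin rs rest)

-- port of Source B: split on '\', rejoin choosing each separator from the next piece
def fix_mingw_cmd_py_alt (path : String) : String :=
  let reserved : List Char := "/ \\)(\"".toList
  let parts := PySem.Chars.splitOn path.toList ['\\']
  match parts with
  | [] => String.mk []   -- unreachable: Python's str.split never returns an empty list
  | p0 :: rest => String.mk (p0 ++ altJoin reserved rest)

-- ===== PRECONDITION & SPEC =====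
def Spec_fix_mingw_cmd_py (path : String) (out : String) : Prop := out = fix_mingw_cmd_py_alt path
instance (path : String) (out : String) : Decidable (Spec_fix_mingw_cmd_py path out) := by unfold Spec_fix_mingw_cmd_py; infer_instance

-- ===== CLAIM (what is proved, stated in full; the proofs are below) =====
def Claim_equal_fix_mingw_cmd_py : Prop := ∀ (path : String), Dom_fix_mingw_cmd_py path → Spec_fix_mingw_cmd_py path (fix_mingw_cmd_py path)

-- ===== LEMMAS AND PROOFS =====

-- A's loop condition at index i, as a predicate on the index
def pvCond (cs : List Char) (i : Nat) : Bool :=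
  decide (cs.getD i ' ' = '\\') &&
    (decide (i + 1 = cs.length) || ! (['/', ' ', '\\', ')', '(', '"'] : List Char).contains (cs.getD (i + 1) ' '))

lemma pvCond_iff (cs : List Char) (i : Nat) : pvCond cs i = true ↔
    (cs.getD i ' ' = '\\' ∧ (i + 1 = cs.length ∨ ¬ (['/', ' ', '\\', ')', '(', '"'] : List Char).contains (cs.getD (i + 1) ' '))) := by
  simp [pvCond]

lemma pvStep_eq (cs : List Char) (l : List Char) (i : Nat) :
    (if cs.getD i ' ' = '\\' then
      if i + 1 = cs.length ∨ ¬ (['/', ' ', '\\', ')', '(', '"'] : List Char).contains (cs.getD (i + 1) ' ') then l.set i '/'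
      else l
    else l) = if pvCond cs i then l.set i '/' else l := by
  rw [if_congr (pvCond_iff cs i) rfl rfl]
  split_ifs with h1 h2 h3 h3 <;> simp_all

lemma pvFoldl_len (cs l : List Char) (n : Nat) :
    ((List.range n).foldl (fun l i => if pvCond cs i then l.set i '/' else l) l).length = l.length := by
  induction n with
  | zero => simp
  | succ m ihm =>
    rw [List.range_succ, List.foldl_append]
    simp only [List.foldl_cons, List.foldl_nil]
    split <;> simp [ihm]

lemma pvFoldl_getElem? (cs : List Char) (n : Nat) (l : List Char) (j : Nat) :
    ((List.range n).foldl (fun l i => if pvCond cs i then l.set i '/' else l) l)[j]? =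
      if j < n ∧ j < l.length ∧ pvCond cs j = true then some '/' else l[j]? := by
  induction n generalizing j with
  | zero => simp
  | succ n ih =>
    rw [List.range_succ, List.foldl_append]
    simp only [List.foldl_cons, List.foldl_nil]
    by_cases hc : pvCond cs n = true
    · rw [if_pos hc, List.getElem?_set, pvFoldl_len]
      by_cases he : n = j
      · subst he
        by_cases hl : n < l.length
        · simp [hl, hc]
        · rw [if_pos rfl, if_neg hl]
          simp [hl]
      · rw [if_neg he, ih]
        have : (j < n + 1 ∧ j < l.length ∧ pvCond cs j = true) ↔ (j < n ∧ j < l.length ∧ pvCond cs j = true) := by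
          constructor
          · rintro ⟨h, h2, h3⟩; exact ⟨by omega, h2, h3⟩
          · rintro ⟨h, h2, h3⟩; exact ⟨by omega, h2, h3⟩
        exact (if_congr this rfl rfl).symm
    · rw [if_neg hc, ih]
      have : (j < n + 1 ∧ j < l.length ∧ pvCond cs j = true) ↔ (j < n ∧ j < l.length ∧ pvCond cs j = true) := by
        constructor
        · rintro ⟨h, h2, h3⟩
          refine ⟨?_, h2, h3⟩
          rcases Nat.lt_succ_iff_lt_or_eq.mp h with h | h
          · exact h
          · subst h; exact absurd h3 hc
        · rintro ⟨h, h2, h3⟩; exact ⟨Nat.lt_succ_of_lt h, h2, h3⟩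
      exact (if_congr this rfl rfl).symm

-- the common recursive characterisation both programs are reduced to
def optRes (o : Option Char) : Bool :=
  match o with
  | none => false
  | some d => (['/', ' ', '\\', ')', '(', '"'] : List Char).contains d

def fixRec : List Char → List Char
  | [] => []
  | c :: rest => (if c = '\\' ∧ optRes rest.head? = false then '/' else c) :: fixRec rest

lemma fixRec_getElem? (cs : List Char) (j : Nat) :
    (fixRec cs)[j]? = (cs[j]?).map (fun c => if c = '\\' ∧ optRes cs[j+1]? = false then '/' else c) := by
  induction cs generalizing j with
  | nil => simp [fixRec]
  | cons c rest ih =>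
    cases j with
    | zero => simp [fixRec, List.head?_eq_getElem?]
    | succ j => simpa [fixRec] using ih j

-- A's result is fixRec
lemma pvA_eq_fixRec (cs : List Char) :
    (List.range cs.length).foldl (fun l i => if pvCond cs i then l.set i '/' else l) cs = fixRec cs := by
  apply List.ext_getElem?
  intro j
  rw [pvFoldl_getElem? cs cs.length cs j, fixRec_getElem?]
  by_cases hj : j < cs.length
  · rw [List.getElem?_eq_getElem hj]
    have hgj : cs.getD j ' ' = cs[j] := List.getD_eq_getElem cs ' ' hj
    simp only [Option.map_some]
    simp only [pvCond_iff]
    by_cases h1 : j + 1 < cs.length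
    · have hgj1 : cs.getD (j + 1) ' ' = cs[j + 1] := List.getD_eq_getElem cs ' ' h1
      have hne : ¬ (j + 1 = cs.length) := by omega
      rw [List.getElem?_eq_getElem h1]
      simp only [hgj, hgj1, optRes, hj, true_and, hne, false_or]
      by_cases hb : cs[j] = '\\' <;>
        by_cases hr : (['/', ' ', '\\', ')', '(', '"'] : List Char).contains cs[j + 1] <;>
        simp [hb, hr] <;> split <;> rfl
    · have hlast : j + 1 = cs.length := by omega
      rw [List.getElem?_eq_none_iff.mpr (by omega)]
      simp only [hgj, optRes, hj, true_and, hlast, true_or]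
      by_cases hb : cs[j] = '\\' <;> simp [hb]
  · rw [List.getElem?_eq_none_iff.mpr (by omega)]
    simp [hj]

-- PySem's fuel-based splitOn on ['\\'] is the plain structural split
def mySplit (pre : List Char) : List Char → List (List Char)
  | [] => [pre]
  | c :: rest => if c = '\\' then pre :: mySplit [] rest else mySplit (pre ++ [c]) rest

lemma go_eq (fuel : Nat) (l cur : List Char) (acc : List (List Char)) (h : l.length ≤ fuel) :
    PySem.Chars.splitOn.go ['\\'] fuel l cur acc = acc.reverse ++ mySplit cur.reverse l := by
  induction fuel generalizing l cur acc with
  | zero =>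
    have : l = [] := by cases l <;> simp_all
    subst this
    simp [PySem.Chars.splitOn.go, mySplit]
  | succ n ih =>
    cases l with
    | nil =>
      rw [show PySem.Chars.splitOn.go ['\\'] (n+1) [] cur acc = (cur.reverse :: acc).reverse from rfl]
      simp [mySplit]
    | cons c rest =>
      by_cases hc : c = '\\'
      · subst hc
        rw [show PySem.Chars.splitOn.go ['\\'] (n+1) ('\\'::rest) cur acc
              = PySem.Chars.splitOn.go ['\\'] n rest [] (cur.reverse :: acc) from by
            simp [PySem.Chars.splitOn.go, List.isPrefixOf]]
        rw [ih rest [] (cur.reverse :: acc) (by simp at h; omega)]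
        simp [mySplit]
      · rw [show PySem.Chars.splitOn.go ['\\'] (n+1) (c::rest) cur acc
              = PySem.Chars.splitOn.go ['\\'] n rest (c :: cur) acc from by
            simp [PySem.Chars.splitOn.go, List.isPrefixOf, Ne.symm hc]]
        rw [ih rest (c::cur) acc (by simp at h; omega)]
        simp [mySplit, hc]

lemma splitOn_eq (cs : List Char) : PySem.Chars.splitOn cs ['\\'] = mySplit [] cs := by
  have := go_eq (cs.length + 1) cs [] [] (by omega)
  simpa [PySem.Chars.splitOn] using this

lemma mySplit_ne_nil (pre cs : List Char) : mySplit pre cs ≠ [] := by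
  induction cs generalizing pre with
  | nil => simp [mySplit]
  | cons c rest ih =>
    by_cases hc : c = '\\' <;> simp [mySplit, hc, ih]

-- what a backslash placed before the string l would be rewritten to
def sepHead (l : List Char) : Char :=
  match l.head? with
  | none => '/'
  | some d => if (['/', ' ', '\\', ')', '(', '"'] : List Char).contains d then '\\' else '/'

lemma sepHead_eq (l : List Char) :
    sepHead l = if optRes l.head? = false then '/' else '\\' := by
  cases hl : l.head? with
  | none => simp [sepHead, optRes, hl]
  | some d =>
    simp [sepHead, optRes, hl]
    split_ifs with h1 h2 <;> first | rfl | tauto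

lemma altJoin_cons (rs nxt : List Char) (r : List (List Char)) :
    altJoin rs (nxt :: r) = (match nxt with
     | d :: _ => if rs.contains d then '\\' else '/'
     | [] => if r = [] then '/' else '\\') :: (nxt ++ altJoin rs r) := rfl

-- B's join over mySplit, one separator per boundary, rebuilds fixRec
lemma altJoin_mySplit (cs pre : List Char) :
    altJoin ['/', ' ', '\\', ')', '(', '"'] (mySplit pre cs) = sepHead (pre ++ cs) :: (pre ++ fixRec cs) := by
  induction cs generalizing pre with
  | nil => cases pre <;> simp [mySplit, altJoin, sepHead, fixRec]
  | cons c rest ih =>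
    by_cases hc : c = '\\'
    · subst hc
      have hne := mySplit_ne_nil ([]) rest
      have ihr := ih ([])
      simp only [List.nil_append] at ihr
      have hfix : fixRec ('\\' :: rest) = sepHead rest :: fixRec rest := by
        simp [fixRec, sepHead_eq]
      rw [show mySplit pre ('\\' :: rest) = pre :: mySplit [] rest from by
        simp [mySplit]]
      cases pre with
      | nil =>
        rw [altJoin_cons]
        simp only [List.nil_append, hfix, ihr, if_neg hne]
        simp [sepHead]
      | cons p ps =>
        rw [altJoin_cons, ihr, hfix]
        simp [sepHead]
    · have hfix : fixRec (c :: rest) = c :: fixRec rest := by simp [fixRec, hc]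
      simp only [mySplit, if_neg hc]
      rw [ih (pre ++ [c]), hfix]
      cases pre <;> simp [sepHead]

-- ===== VERDICT (by name: the statement is the Claim_ definition above) =====
theorem fix_mingw_cmd_py_spec : Claim_equal_fix_mingw_cmd_py := by
  intro path _
  unfold Spec_fix_mingw_cmd_py fix_mingw_cmd_py fix_mingw_cmd_py_alt
  simp only []
  have hstep : (fun (l : List Char) (i : Nat) =>
      if path.toList.getD i ' ' = '\\' then
        if i + 1 = path.toList.length ∨ ¬ (['/', ' ', '\\', ')', '(', '"'] : List Char).contains (path.toList.getD (i + 1) ' ') then l.set i '/'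
        else l
      else l) = (fun l i => if pvCond path.toList i then l.set i '/' else l) := by
    funext l i; exact pvStep_eq path.toList l i
  rw [hstep, pvA_eq_fixRec, splitOn_eq]
  have hres : ("/ \\)(\"" : String).toList = ['/', ' ', '\\', ')', '(', '"'] := by decide
  rw [hres]
  have hJ := altJoin_mySplit path.toList ([])
  simp only [List.nil_append] at hJ
  cases hM : mySplit ([]) path.toList with
  | nil => exact absurd hM (mySplit_ne_nil _ _)
  | cons p0 rest =>
    rw [hM] at hJ
    have h2 := ((List.cons.injEq _ _ _ _).mp hJ).2
    rw [show (match p0 :: rest with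
        | [] => String.mk ([] : List Char)
        | p0 :: rest => String.mk (p0 ++ altJoin ['/', ' ', '\\', ')', '(', '"'] rest))
        = String.mk (p0 ++ altJoin ['/', ' ', '\\', ')', '(', '"'] rest) from rfl]
    rw [h2]
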